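-- pv_equiv track=rewrite | github.com/DDokddoks/2023-Algorithm-Study | Week9/Delivery box/taegyu.py | solution
-- ===== SOURCE A (Python) =====
-- def solution(order):
--     answer = 0
--
--     idx = 0
--     box_num = 1
--     stk = []
--
--     while box_num <= len(order):
--         if order[idx] == box_num:
--             answer += 1
--             idx += 1
--             box_num += 1
--         elif stk and stk[-1] == order[idx]:
--             stk.pop()
--             answer += 1
--             idx += 1
--         else:
--             stk.append(box_num)
--             box_num += 1
--
--     for num in stk[::-1]:
--         if num == order[idx]:
--             answer += 1
--             idx += 1
--         else:
--             break
--
--     return answer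
-- ===== SOURCE B (Python) =====
-- def solution(order):
--     n = len(order)
--     seen = set()
--     m = 0
--     for j, v in enumerate(order):
--         if v < 1 or v > n or v in seen or any(w not in seen for w in range(v + 1, m + 1)):
--             return j
--         seen.add(v)
--         if v > m:
--             m = v
--     return n
-- ===== Notes on version B (the rewrite author's own statement) =====
-- stated objective: alternative
-- what changed: B drops the stack simulation entirely: it scans order once with a delivered-set and a running maximum, testing each requested box against a declarative deliverability criterion (1 <= v <= n, not yet delivered, and every box between v and the running max already delivered) and returns the index of the first failure.
import Mathlib
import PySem

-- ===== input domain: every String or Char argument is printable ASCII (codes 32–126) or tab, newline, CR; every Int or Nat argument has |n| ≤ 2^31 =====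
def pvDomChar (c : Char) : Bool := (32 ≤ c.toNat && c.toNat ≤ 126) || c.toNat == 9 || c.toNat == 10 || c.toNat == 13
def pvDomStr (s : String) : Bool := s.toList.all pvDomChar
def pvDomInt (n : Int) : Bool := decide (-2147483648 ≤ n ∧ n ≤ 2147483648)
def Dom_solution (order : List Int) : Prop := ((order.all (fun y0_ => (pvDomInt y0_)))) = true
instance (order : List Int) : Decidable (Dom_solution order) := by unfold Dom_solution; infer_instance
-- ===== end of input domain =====

-- B replaces A's stack simulation by a single scan that tests each requested box against a
-- declarative deliverability criterion (seen-set + running max); objective: alternative algorithm.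

-- ===== PORT A =====
-- The Python stack 'stk' is kept top-first (cons = append, head = stk[-1], the list itself = stk[::-1]).

-- termination measure facts for solutionLoop's while loop (cited by name in its decreasing_by)
lemma solutionLoop_decBox (n box : Int) (L : Nat) (h : box ≤ n) :
    2 * ((n + 1 - (box + 1)).toNat) + L < 2 * ((n + 1 - box).toNat) + L := by omega
lemma solutionLoop_decPop (T : Nat) (t : Int) (rest : List Int) :
    2 * T + rest.length < 2 * T + (t :: rest).length := by simp
lemma solutionLoop_decPush (n box b : Int) (stk : List Int) (h : box ≤ n) :
    2 * ((n + 1 - (box + 1)).toNat) + (b :: stk).length < 2 * ((n + 1 - box).toNat) + stk.length := by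
  simp only [List.length_cons]; omega

-- A's trailing 'for num in stk[::-1]' loop.
def solutionTail (order : List Int) (stk : List Int) (idx ans : Int) : Int :=
  match stk with
  | [] => ans
  | num :: rest =>
    match PySem.List.pyGet? order idx with
    | none => ans  -- Python would raise IndexError here; unreachable from 'solution' (see proofs)
    | some v => if num = v then solutionTail order rest (idx + 1) (ans + 1) else ans

-- A's main 'while box_num <= len(order)' loop.
def solutionLoop (order : List Int) (idx box ans : Int) (stk : List Int) : Int :=
  if h : box ≤ (order.length : Int) then
    match PySem.List.pyGet? order idx with
    | none => ans  -- Python would raise IndexError here; unreachable from 'solution' (see proofs)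
    | some v =>
      if v = box then solutionLoop order (idx + 1) (box + 1) (ans + 1) stk
      else
        match stk with
        | t :: rest =>
          if t = v then solutionLoop order (idx + 1) box (ans + 1) rest
          else solutionLoop order idx (box + 1) ans (box :: t :: rest)
        | [] => solutionLoop order idx (box + 1) ans [box]
  else solutionTail order stk idx ans
termination_by 2 * ((order.length : Int) + 1 - box).toNat + stk.length
decreasing_by
  all_goals first
    | exact solutionLoop_decBox _ _ _ h
    | exact solutionLoop_decPop _ _ _
    | exact solutionLoop_decPush _ _ _ _ h

def solution (order : List Int) : Int := solutionLoop order 0 1 0 []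

-- ===== PORT B =====
-- B's 'for j, v in enumerate(order)' loop with early return; 'seen' is the Python set.
def altLoop (order : List Int) (rest : List Int) (j : Int) (seen : PySem.Set Int) (m : Int) : Int :=
  match rest with
  | [] => (order.length : Int)
  | v :: tl =>
    if v < 1 ∨ (order.length : Int) < v ∨ PySem.Set.contains seen v = true ∨
        (PySem.List.pyRange (v + 1) (m + 1) 1).any (fun w => !(PySem.Set.contains seen w)) = true
    then j
    else altLoop order tl (j + 1) (PySem.Set.add seen v) (if v > m then v else m)

def solution_alt (order : List Int) : Int := altLoop order order 0 PySem.Set.empty 0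

-- ===== PRECONDITION & SPEC =====
def Spec_solution (order : List Int) (out : Int) : Prop := out = solution_alt order
instance (order : List Int) (out : Int) : Decidable (Spec_solution order out) := by unfold Spec_solution; infer_instance

-- ===== CLAIM (what is proved, stated in full; the proofs are below) =====
def Claim_equal_solution : Prop := ∀ (order : List Int), Dom_solution order → Spec_solution order (solution order)

-- ===== LEMMAS AND PROOFS =====

-- A's loop, once box has passed len(order): the tail loop breaks at once when the top ≠ order[idx].
lemma A_exit (order : List Int) (idx box ans v : Int) (stk : List Int)
    (hble : ¬ box ≤ (order.length : Int))
    (hget : PySem.List.pyGet? order idx = some v)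
    (hhd : ∀ t ∈ stk.head?, t ≠ v) :
    solutionLoop order idx box ans stk = ans := by
  rw [solutionLoop, dif_neg hble]
  cases stk with
  | nil => simp [solutionTail]
  | cons t rest =>
    have ht : t ≠ v := hhd t (by simp)
    simp [solutionTail, hget, ht]

-- A gets stuck: requested value can never be delivered (below every future box and not on top).
lemma A_stuck (order : List Int) : ∀ (c : Nat) (idx box ans v : Int) (stk : List Int),
    ((order.length : Int) + 1 - box).toNat ≤ c →
    PySem.List.pyGet? order idx = some v →
    (∀ x ∈ stk, x < box) →
    (v < box ∨ (order.length : Int) < v) →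
    (∀ t ∈ stk.head?, t ≠ v) →
    solutionLoop order idx box ans stk = ans := by
  intro c
  induction c with
  | zero =>
    intro idx box ans v stk hc hget hlt hv hhd
    exact A_exit order idx box ans v stk (by omega) hget hhd
  | succ c ih =>
    intro idx box ans v stk hc hget hlt hv hhd
    by_cases hble : box ≤ (order.length : Int)
    · have hvbox : ¬ v = box := by omega
      cases stk with
      | nil =>
        rw [solutionLoop, dif_pos hble]
        simp only [hget]
        rw [if_neg hvbox]
        exact ih idx (box + 1) ans v [box] (by omega) hget
          (by intro x hx; simp at hx; omega) (by omega)
          (by intro t ht; simp at ht; omega)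
      | cons t rest =>
        have ht : ¬ t = v := hhd t (by simp)
        rw [solutionLoop, dif_pos hble]
        simp only [hget]
        rw [if_neg hvbox, if_neg ht]
        exact ih idx (box + 1) ans v (box :: t :: rest) (by omega) hget
          (by intro x hx; simp at hx
              rcases hx with h | h | h
              · omega
              · have := hlt x (by simp [h]); omega
              · have := hlt x (by simp [h]); omega)
          (by omega) (by intro u hu; simp at hu; omega)
    · exact A_exit order idx box ans v stk hble hget hhd

-- the run of boxes box..v-1 that A pushes before delivering v directly, top-first
lemma pushSeg_snoc (box v : Int) (h : box < v) :
    PySem.List.pyRange (v - 1) (box - 1) (-1)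
      = PySem.List.pyRange (v - 1) box (-1) ++ [box] := by
  rw [PySem.List.pyRange_neg_one_eq_reverse, PySem.List.pyRange_neg_one_eq_reverse]
  rw [show box - 1 + 1 = box from by ring, show v - 1 + 1 = v from by ring]
  rw [PySem.List.pyRange_one_cons h]
  simp

-- A pushes box..v-1 and then delivers v directly.
lemma A_pushrun (order : List Int) : ∀ (c : Nat) (idx box ans v : Int) (stk : List Int),
    (v - box).toNat ≤ c →
    PySem.List.pyGet? order idx = some v →
    box ≤ v → v ≤ (order.length : Int) →
    (∀ x ∈ stk, x < box) →
    solutionLoop order idx box ans stk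
      = solutionLoop order (idx + 1) (v + 1) (ans + 1)
          (PySem.List.pyRange (v - 1) (box - 1) (-1) ++ stk) := by
  intro c
  induction c with
  | zero =>
    intro idx box ans v stk hc hget hbv hvn hlt
    have hbe : v = box := by omega
    subst hbe
    rw [solutionLoop, dif_pos (by omega), PySem.List.pyRange_neg_one_eq_nil (by omega)]
    simp [hget]
  | succ c ih =>
    intro idx box ans v stk hc hget hbv hvn hlt
    by_cases heq : v = box
    · subst heq
      rw [solutionLoop, dif_pos (by omega), PySem.List.pyRange_neg_one_eq_nil (by omega)]
      simp [hget]
    · have hlt2 : box < v := by omega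
      cases stk with
      | nil =>
        rw [solutionLoop, dif_pos (by omega)]
        simp only [hget]
        rw [if_neg heq]
        rw [ih idx (box + 1) ans v [box] (by omega) hget (by omega) hvn
              (by intro x hx; simp at hx; omega)]
        rw [show box + 1 - 1 = box from by ring, pushSeg_snoc box v hlt2]
        simp
      | cons t rest =>
        have ht : ¬ t = v := by have := hlt t (by simp); omega
        rw [solutionLoop, dif_pos (by omega)]
        simp only [hget]
        rw [if_neg heq, if_neg ht]
        rw [ih idx (box + 1) ans v (box :: t :: rest) (by omega) hget (by omega) hvn
              (by intro x hx; simp at hx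
                  rcases hx with h | h | h
                  · omega
                  · have := hlt x (by simp [h]); omega
                  · have := hlt x (by simp [h]); omega)]
        rw [show box + 1 - 1 = box from by ring, pushSeg_snoc box v hlt2]
        simp

-- A pops the top of the stack (works both in the main loop and the tail loop).
lemma A_pop_step (order : List Int) (idx box ans t v : Int) (stail : List Int)
    (hget : PySem.List.pyGet? order idx = some v) (htv : t = v) (htb : t < box) :
    solutionLoop order idx box ans (t :: stail)
      = solutionLoop order (idx + 1) box (ans + 1) stail := by
  by_cases hble : box ≤ (order.length : Int)
  · rw [solutionLoop, dif_pos hble]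
    simp only [hget]
    rw [if_neg (by omega : ¬ v = box), if_pos htv]
  · rw [solutionLoop, dif_neg hble, solutionLoop, dif_neg hble]
    simp [solutionTail, hget, htv]

-- Bisimulation. Invariants of A's state (idx = k, box, stk) in terms of B's state (seen, m = box-1):
-- stk holds, top-first strictly decreasing, the undelivered boxes among 1..box-1; seen the delivered ones.
lemma main_loop (order : List Int) : ∀ (rest : List Int) (k : Nat) (box : Int) (stk seen : List Int),
    order.drop k = rest →
    (k : Int) + stk.length = box - 1 →
    box ≤ (order.length : Int) + 1 →
    List.Pairwise (· > ·) stk →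
    (∀ x ∈ stk, 1 ≤ x ∧ x ≤ box - 1) →
    (∀ w : Int, w ∈ seen ↔ 1 ≤ w ∧ w ≤ box - 1 ∧ w ∉ stk) →
    solutionLoop order (k : Int) box (k : Int) stk = altLoop order rest (k : Int) seen (box - 1) := by
  intro rest
  induction rest with
  | nil =>
    intro k box stk seen hdrop hlen hbox hpw helem hseen
    have hk : order.length ≤ k := by
      have := congrArg List.length hdrop
      simp [List.length_drop] at this
      omega
    have hstk : stk = [] := by
      have : stk.length = 0 := by omega
      exact List.length_eq_zero_iff.mp this
    subst hstk
    simp only [List.length_nil] at hlen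
    rw [altLoop, solutionLoop, dif_neg (by omega)]
    simp [solutionTail]
    omega
  | cons v tl ih =>
    intro k box stk seen hdrop hlen hbox hpw helem hseen
    have hkn : k < order.length := by
      have := congrArg List.length hdrop
      simp [List.length_drop] at this
      omega
    have hget : PySem.List.pyGet? order (k : Int) = some v := by
      have h0 : (order.drop k)[0]? = some v := by rw [hdrop]; rfl
      rw [List.getElem?_drop] at h0
      simpa using h0
    have hdrop' : order.drop (k + 1) = tl := by
      have : order.drop (k + 1) = List.drop 1 (order.drop k) := by
        rw [List.drop_drop]
      rw [this, hdrop]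
      rfl
    have hbox1 : (1 : Int) ≤ box := by omega
    by_cases hv1 : v < 1
    · rw [A_stuck order (((order.length : Int) + 1 - box).toNat) (k : Int) box (k : Int) v stk
            le_rfl hget (fun x hx => by have := helem x hx; omega) (Or.inl (by omega))
            (fun t ht => by have := helem t (List.mem_of_mem_head? ht); omega)]
      rw [altLoop, if_pos (Or.inl hv1)]
    · by_cases hvn : (order.length : Int) < v
      · rw [A_stuck order (((order.length : Int) + 1 - box).toNat) (k : Int) box (k : Int) v stk
              le_rfl hget (fun x hx => by have := helem x hx; omega) (Or.inr hvn)
              (fun t ht => by have := helem t (List.mem_of_mem_head? ht); omega)]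
        rw [altLoop, if_pos (Or.inr (Or.inl hvn))]
      · by_cases hvbox : box ≤ v
        · -- deliverable by pushing box..v-1 then delivering v directly
          have hnotbad : ¬ (v < 1 ∨ (order.length : Int) < v ∨ PySem.Set.contains seen v = true ∨
              (PySem.List.pyRange (v + 1) (box - 1 + 1) 1).any
                (fun w => !(PySem.Set.contains seen w)) = true) := by
            rw [show box - 1 + 1 = box from by ring,
                PySem.List.pyRange_one_eq_nil (by omega : box ≤ v + 1)]
            simp only [List.any_nil]
            push_neg
            refine ⟨by omega, by omega, ?_, by simp⟩
            intro hcont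
            have := (PySem.Set.contains_iff _ _).mp hcont
            have := (hseen v).mp this
            omega
          rw [altLoop, if_neg hnotbad]
          rw [A_pushrun order ((v - box).toNat) (k : Int) box (k : Int) v stk le_rfl hget hvbox
                (by omega) (fun x hx => by have := helem x hx; omega)]
          rw [if_pos (by omega : v > box - 1)]
          have hk1 : ((k : Int) + 1) = ((k + 1 : Nat) : Int) := by push_cast; ring
          rw [hk1]
          have hmemseg : ∀ x, x ∈ PySem.List.pyRange (v - 1) (box - 1) (-1) ↔
              box - 1 < x ∧ x ≤ v - 1 := by
            intro x; exact PySem.List.mem_pyRange_neg_one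
          have := ih (k + 1) (v + 1) (PySem.List.pyRange (v - 1) (box - 1) (-1) ++ stk)
            (PySem.Set.add seen v) hdrop'
            (by rw [List.length_append, PySem.List.length_pyRange_neg_one]
                push_cast
                omega)
            (by omega)
            (by rw [List.pairwise_append]
                refine ⟨?_, hpw, ?_⟩
                · rw [PySem.List.pyRange_neg_one_eq_reverse, List.pairwise_reverse]
                  exact (PySem.List.pairwise_lt_pyRange_one _ _).imp (fun h => h)
                · intro x hx y hy
                  have hx' := (hmemseg x).mp hx
                  have := helem y hy
                  omega)
            (by intro x hx
                rcases List.mem_append.mp hx with h | h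
                · have := (hmemseg x).mp h; omega
                · have := helem x h; omega)
            (by intro w
                have hvstk : v ∉ stk := fun h => by have := helem v h; omega
                rw [PySem.Set.mem_add]
                constructor
                · rintro (hw | rfl)
                  · have := (hseen w).mp hw
                    refine ⟨by omega, by omega, ?_⟩
                    rw [List.mem_append]
                    rintro (h | h)
                    · have := (hmemseg w).mp h; omega
                    · exact this.2.2 h
                  · refine ⟨by omega, by omega, ?_⟩
                    rw [List.mem_append]
                    rintro (h | h)
                    · have := (hmemseg w).mp h; omega
                    · exact hvstk h
                · rintro ⟨h1, h2, h3⟩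
                  rw [List.mem_append] at h3
                  push_neg at h3
                  by_cases hw : w = v
                  · exact Or.inr hw
                  · left
                    refine (hseen w).mpr ⟨h1, ?_, h3.2⟩
                    have := h3.1
                    rw [hmemseg w] at this
                    omega)
          rw [this, show v + 1 - 1 = v from by ring]
        · -- v ≤ box - 1: already pushed; delivered already, on top of the stack, or buried
          by_cases hvstk : v ∈ stk
          · cases stk with
            | nil => simp at hvstk
            | cons t stail =>
              by_cases htv : t = v
              · -- pop both sides
                have htb : t < box := by have := helem t (by simp); omega
                rw [A_pop_step order (k : Int) box (k : Int) t v stail hget htv htb]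
                have htail := (List.pairwise_cons.mp hpw)
                have hnotbad : ¬ (v < 1 ∨ (order.length : Int) < v ∨
                    PySem.Set.contains seen v = true ∨
                    (PySem.List.pyRange (v + 1) (box - 1 + 1) 1).any
                      (fun w => !(PySem.Set.contains seen w)) = true) := by
                  push_neg
                  refine ⟨by omega, by omega, ?_, ?_⟩
                  · intro hcont
                    have := (hseen v).mp ((PySem.Set.contains_iff _ _).mp hcont)
                    exact this.2.2 hvstk
                  · rw [ne_eq, Bool.not_eq_true, List.any_eq_false]
                    intro w hw
                    rw [show box - 1 + 1 = box from by ring] at hw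
                    have hwb := PySem.List.mem_pyRange_one.mp hw
                    have hwseen : w ∈ seen := by
                      refine (hseen w).mpr ⟨by omega, by omega, ?_⟩
                      intro hmem
                      rcases List.mem_cons.mp hmem with h | h
                      · omega
                      · have := htail.1 w h; omega
                    simpa using hwseen
                rw [altLoop, if_neg hnotbad, if_neg (by omega : ¬ v > box - 1)]
                have hk1 : ((k : Int) + 1) = ((k + 1 : Nat) : Int) := by push_cast; ring
                rw [hk1]
                refine ih (k + 1) box stail (PySem.Set.add seen v) hdrop'
                  (by simp at hlen; push_cast; omega) hbox htail.2
                  (fun x hx => helem x (by simp [hx]))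
                  ?_
                intro w
                have htns : t ∉ stail := fun h => by have := htail.1 t h; omega
                rw [PySem.Set.mem_add]
                constructor
                · rintro (hw | rfl)
                  · have := (hseen w).mp hw
                    exact ⟨this.1, this.2.1, fun h => this.2.2 (by simp [h])⟩
                  · have := helem t (by simp)
                    subst htv
                    exact ⟨this.1, this.2, htns⟩
                · rintro ⟨h1, h2, h3⟩
                  by_cases hw : w = t
                  · exact Or.inr (by omega)
                  · exact Or.inl ((hseen w).mpr ⟨h1, h2, by simp [hw, h3]⟩)
              · -- buried below t: stuck, and B sees the unseen witness t above v
                have hmem : v ∈ stail := by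
                  rcases List.mem_cons.mp hvstk with h | h
                  · exact absurd h.symm htv
                  · exact h
                have htgt : t > v := (List.pairwise_cons.mp hpw).1 v hmem
                rw [A_stuck order (((order.length : Int) + 1 - box).toNat) (k : Int) box (k : Int)
                      v (t :: stail) le_rfl hget (fun x hx => by have := helem x hx; omega)
                      (Or.inl (by omega)) (by intro u hu; simp at hu; omega)]
                have hbad : (PySem.List.pyRange (v + 1) (box - 1 + 1) 1).any
                    (fun w => !(PySem.Set.contains seen w)) = true := by
                  rw [List.any_eq_true]
                  refine ⟨t, ?_, ?_⟩
                  · rw [show box - 1 + 1 = box from by ring, PySem.List.mem_pyRange_one]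
                    have := helem t (by simp)
                    omega
                  · have htseen : t ∉ seen := fun h => ((hseen t).mp h).2.2 (by simp)
                    simpa using htseen
                rw [altLoop, if_pos (Or.inr (Or.inr (Or.inr hbad)))]
          · -- already delivered: stuck, and B sees it in 'seen'
            have hvseen : v ∈ seen := (hseen v).mpr ⟨by omega, by omega, hvstk⟩
            rw [A_stuck order (((order.length : Int) + 1 - box).toNat) (k : Int) box (k : Int) v stk
                  le_rfl hget (fun x hx => by have := helem x hx; omega) (Or.inl (by omega))
                  (by intro t ht
                      have htm := List.mem_of_mem_head? ht
                      intro h; exact hvstk (h ▸ htm))]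
            rw [altLoop, if_pos (Or.inr (Or.inr (Or.inl ((PySem.Set.contains_iff _ _).mpr hvseen))))]

-- ===== VERDICT (by name: the statement is the Claim_ definition above) =====
theorem solution_spec : Claim_equal_solution := by
  intro order _
  unfold Spec_solution solution solution_alt
  have h := main_loop order order 0 1 [] PySem.Set.empty (by simp) (by simp)
    (by omega) (by simp) (by simp) (by intro w; simp [PySem.Set.empty]; omega)
  simpa using h
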